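-- pv_equiv track=rewrite | github.com/gourav-sharma1857/cipher-spry-backend | patterns.py | double_index_mod_26
-- ===== SOURCE A (Python) =====
-- MOD_26 = 26 # Constant for modulo 26, used for wrapping around the alphabet (A-Z)
--
-- ASCII_A_UPPER = ord('A') # ASCII value of 'A' (65), used as a base for character-to-index conversion
--
-- def double_index_mod_26(word: str) -> str: # Pattern: doubles each letter's alphabetical index, then wraps around alphabet
--     transformed = [] # Initialize an empty list
--     for char in word: # Iterate through each character
--         if 'A' <= char <= 'Z': # Check if it's an uppercase letter
--             original_index = ord(char) - ASCII_A_UPPER # Get 0-25 index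
--             transformed_index = (original_index * 2) % MOD_26 # Double index and apply modulo 26
--             transformed.append(chr(ASCII_A_UPPER + transformed_index)) # Convert back to character
--         else: # If not a letter, append unchanged
--             transformed.append(char)
--     return "".join(transformed) # Join the list of characters
-- ===== SOURCE B (Python) =====
-- def double_index_mod_26(word: str) -> str:
--     # Divide-and-conquer: split the string in halves, recurse, concatenate.
--     # A single letter is transformed by a linear formula per alphabet half
--     # (2i mod 26 = 2i for A-M, 2i-26 for N-Z), so no modulo is needed.
--     n = len(word)
--     if n == 0:
--         return ""
--     if n == 1:
--         c = word
--         if 'A' <= c <= 'M':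
--             return chr(2 * ord(c) - 65)
--         if 'N' <= c <= 'Z':
--             return chr(2 * ord(c) - 91)
--         return c
--     mid = n // 2
--     return double_index_mod_26(word[:mid]) + double_index_mod_26(word[mid:])
-- ===== Notes on version B (the rewrite author's own statement) =====
-- stated objective: alternative
-- what changed: Replaces the left-to-right accumulate loop with mod-26 arithmetic by a divide-and-conquer recursion that splits the string in halves and, at single characters, uses branch-based linear formulas (2*ord(c)-65 for A-M, 2*ord(c)-91 for N-Z) instead of modulo.
import Mathlib
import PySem

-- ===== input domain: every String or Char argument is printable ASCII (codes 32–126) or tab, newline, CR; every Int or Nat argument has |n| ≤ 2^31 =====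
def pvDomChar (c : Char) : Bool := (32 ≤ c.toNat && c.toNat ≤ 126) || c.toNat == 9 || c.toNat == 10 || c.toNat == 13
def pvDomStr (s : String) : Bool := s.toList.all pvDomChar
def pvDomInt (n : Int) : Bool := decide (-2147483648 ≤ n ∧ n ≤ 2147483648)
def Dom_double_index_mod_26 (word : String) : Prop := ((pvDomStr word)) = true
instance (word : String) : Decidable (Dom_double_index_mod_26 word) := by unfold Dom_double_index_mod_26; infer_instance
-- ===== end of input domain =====

-- B is a divide-and-conquer recursion on string halves using branch-based linear formulas
-- instead of A's accumulate loop with mod-26 arithmetic (alternative decomposition, same cost class).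
-- ===== PORT A =====
def double_index_mod_26 (word : String) : String :=
  let transformed : List Char := word.toList.foldl (fun transformed char =>
    if 'A' ≤ char ∧ char ≤ 'Z' then
      let original_index : Int := (char.toNat : Int) - 65
      let transformed_index : Int := PySem.Int.mod (original_index * 2) 26
      transformed ++ [Char.ofNat (65 + transformed_index).toNat]
    else
      transformed ++ [char]) []
  String.ofList transformed

-- ===== PORT B =====
-- divide-and-conquer body of Source B, over the character list
def pvAltGo : List Char → List Char
  | [] => []
  | [c] =>
      if 'A' ≤ c ∧ c ≤ 'M' then [Char.ofNat (2 * c.toNat - 65)]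
      else if 'N' ≤ c ∧ c ≤ 'Z' then [Char.ofNat (2 * c.toNat - 91)]
      else [c]
  | c1 :: c2 :: rest =>
      let l := c1 :: c2 :: rest
      pvAltGo (l.take (l.length / 2)) ++ pvAltGo (l.drop (l.length / 2))
termination_by l => l.length
decreasing_by
  · simp [List.length_take]; omega
  · simp [List.length_drop]; omega

def double_index_mod_26_alt (word : String) : String :=
  String.ofList (pvAltGo word.toList)

-- ===== PRECONDITION & SPEC =====
def Spec_double_index_mod_26 (word : String) (out : String) : Prop := out = double_index_mod_26_alt word
instance (word : String) (out : String) : Decidable (Spec_double_index_mod_26 word out) := by unfold Spec_double_index_mod_26; infer_instance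

-- ===== CLAIM (what is proved, stated in full; the proofs are below) =====
def Claim_equal_double_index_mod_26 : Prop := ∀ (word : String), Dom_double_index_mod_26 word → Spec_double_index_mod_26 word (double_index_mod_26 word)

-- ===== LEMMAS AND PROOFS =====
-- A's per-character transformation, as a function
def pvStepA (char : Char) : Char :=
  if 'A' ≤ char ∧ char ≤ 'Z' then
    Char.ofNat (65 + PySem.Int.mod (((char.toNat : Int) - 65) * 2) 26).toNat
  else char

-- B's per-character transformation, as a function
def pvStepB (c : Char) : Char :=
  if 'A' ≤ c ∧ c ≤ 'M' then Char.ofNat (2 * c.toNat - 65)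
  else if 'N' ≤ c ∧ c ≤ 'Z' then Char.ofNat (2 * c.toNat - 91)
  else c

set_option maxRecDepth 8192 in
set_option maxHeartbeats 1000000 in
lemma pvStep_eq_ofNat : ∀ n : Nat, n < 127 →
    pvStepA (Char.ofNat n) = pvStepB (Char.ofNat n) := by decide

lemma pvStep_eq (c : Char) (h : pvDomChar c = true) : pvStepA c = pvStepB c := by
  have hlt : c.toNat < 127 := by simp [pvDomChar] at h; omega
  have := pvStep_eq_ofNat c.toNat hlt
  rwa [Char.ofNat_toNat] at this

lemma pvAltGo_eq_map : ∀ l : List Char, pvAltGo l = l.map pvStepB := by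
  intro l
  induction l using pvAltGo.induct with
  | case1 => simp [pvAltGo]
  | case2 c h => simp [pvAltGo, pvStepB, h]
  | case3 c h1 h2 => simp [pvAltGo, pvStepB, h1, h2]
  | case4 c h1 h2 => simp [pvAltGo, pvStepB, h1, h2]
  | case5 c1 c2 rest x ih1 ih2 =>
      rw [pvAltGo, ih1, ih2, ← List.map_append, List.take_append_drop]

lemma pvLoop_eq (l : List Char) (h : l.all pvDomChar = true) (acc : List Char) :
    l.foldl (fun transformed char =>
      if 'A' ≤ char ∧ char ≤ 'Z' then
        transformed ++ [Char.ofNat (65 + PySem.Int.mod (((char.toNat : Int) - 65) * 2) 26).toNat]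
      else
        transformed ++ [char]) acc
    = acc ++ l.map pvStepB := by
  induction l generalizing acc with
  | nil => simp
  | cons c t ih =>
    simp only [List.all_cons, Bool.and_eq_true] at h
    have hc := pvStep_eq c h.1
    simp only [List.foldl_cons, List.map_cons]
    rw [ih h.2]
    by_cases hb : 'A' ≤ c ∧ c ≤ 'Z' <;>
      simp only [pvStepA, hb, if_neg, not_false_iff] at hc <;>
      simp [hb, ← hc]

-- ===== VERDICT (by name: the statement is the Claim_ definition above) =====
theorem double_index_mod_26_spec : Claim_equal_double_index_mod_26 := by
  intro word hdom
  unfold Spec_double_index_mod_26 double_index_mod_26 double_index_mod_26_alt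
  have h : word.toList.all pvDomChar = true := hdom
  simp only []
  rw [pvLoop_eq word.toList h, List.nil_append, pvAltGo_eq_map]
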